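-- pv_equiv track=rewrite | github.com/ElainW/xTea_locus | xtea/x_somatic_calling.py | cmp_case_control
-- ===== SOURCE A (Python) =====
-- def cmp_case_control(m_case, m_control, islack):
--     m_candidates={}
--     for chrm in m_case:#doesn't have this chrm
--         if chrm not in m_control:
--             if chrm not in m_candidates:
--                 m_candidates[chrm]={}
--             for pos in m_case[chrm]:
--                 m_candidates[chrm][pos]=m_case[chrm][pos]
--         else:###have this chrm
--             for pos in m_case[chrm]:
--                 b_exist = False
--                 for i in range(-1 * islack, islack):
--                     if (pos + i) in m_control[chrm]:
--                         b_exist = True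
--                         break
--                 if b_exist==False:
--                     if chrm not in m_candidates:
--                         m_candidates[chrm]={}
--                     m_candidates[chrm][pos]=m_case[chrm][pos]
--     return m_candidates
-- ===== SOURCE B (Python) =====
-- def _bisect_left(a, x):
--     lo, hi = 0, len(a)
--     while lo < hi:
--         mid = (lo + hi) // 2
--         if a[mid] < x:
--             lo = mid + 1
--         else:
--             hi = mid
--     return lo
--
--
-- def cmp_case_control(m_case, m_control, islack):
--     out = {}
--     for chrm in m_case:
--         if chrm not in m_control:
--             out[chrm] = dict(m_case[chrm])
--         else:
--             ctrl = sorted(m_control[chrm])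
--             kept = {}
--             for pos in m_case[chrm]:
--                 i = _bisect_left(ctrl, pos - islack)
--                 if i == len(ctrl) or ctrl[i] >= pos + islack:
--                     kept[pos] = m_case[chrm][pos]
--             if kept:
--                 out[chrm] = kept
--     return out
-- ===== Notes on version B (the rewrite author's own statement) =====
-- stated objective: faster
-- what changed: A tests every one of the 2*islack offsets pos+i for membership in the control dict; B sorts each chromosome's control positions once and decides 'a control position within islack' with a single hand-written binary search per case position.
import Mathlib
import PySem

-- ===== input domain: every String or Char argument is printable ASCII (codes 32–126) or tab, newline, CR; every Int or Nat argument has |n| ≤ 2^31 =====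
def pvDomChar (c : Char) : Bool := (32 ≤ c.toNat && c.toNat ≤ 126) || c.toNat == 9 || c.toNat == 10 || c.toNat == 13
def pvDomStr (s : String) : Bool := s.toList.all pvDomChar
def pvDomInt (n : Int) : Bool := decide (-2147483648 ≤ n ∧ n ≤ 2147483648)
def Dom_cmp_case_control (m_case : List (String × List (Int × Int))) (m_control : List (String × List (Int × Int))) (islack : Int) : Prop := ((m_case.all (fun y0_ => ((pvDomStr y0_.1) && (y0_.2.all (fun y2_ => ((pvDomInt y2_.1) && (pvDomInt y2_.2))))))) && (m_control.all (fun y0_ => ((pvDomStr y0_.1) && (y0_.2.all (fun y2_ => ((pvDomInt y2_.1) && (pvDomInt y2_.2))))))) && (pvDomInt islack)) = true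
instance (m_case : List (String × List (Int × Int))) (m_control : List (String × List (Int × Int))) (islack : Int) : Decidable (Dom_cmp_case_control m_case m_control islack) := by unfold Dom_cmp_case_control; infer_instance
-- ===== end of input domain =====

-- B replaces A's inner scan over the 2·islack offsets by one binary search in the
-- sorted control positions of the chromosome (objective: faster, asymptotic in islack).

-- ===== PORT A =====
-- one outer step of A's loop 'for chrm in m_case'
def pvStepA (ctl : PySem.Dict String (List (Int × Int))) (islack : Int)
    (cand : PySem.Dict String (PySem.Dict Int Int)) (cd : String × List (Int × Int)) :
    PySem.Dict String (PySem.Dict Int Int) :=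
  match ctl.get? cd.1 with
  | none =>
      let cand1 := if cand.contains cd.1 then cand else cand.insert cd.1 PySem.Dict.empty
      cd.2.foldl (fun c pv => c.modify cd.1 PySem.Dict.empty (fun inner => inner.insert pv.1 pv.2)) cand1
  | some ctrl =>
      cd.2.foldl (fun c pv =>
        let b_exist := (PySem.List.pyRange (-1 * islack) islack).any
          (fun i => (PySem.Dict.mk ctrl).contains (pv.1 + i))
        if b_exist then c
        else
          let c1 := if c.contains cd.1 then c else c.insert cd.1 PySem.Dict.empty
          c1.modify cd.1 PySem.Dict.empty (fun inner => inner.insert pv.1 pv.2)) cand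

def cmp_case_control (m_case : List (String × List (Int × Int))) (m_control : List (String × List (Int × Int))) (islack : Int) : List (String × List (Int × Int)) :=
  ((m_case.foldl (pvStepA (PySem.Dict.mk m_control) islack) PySem.Dict.empty).items).map
    (fun p => (p.1, p.2.items))

-- ===== PORT B =====
-- B's keep test: one binary search (Source B's hand-written _bisect_left is Python's
-- bisect_left, ported as PySem.List.bisectLeft; the getD only totalises ctrl[i])
def pvKeepB (ctrl : List Int) (islack pos : Int) : Bool :=
  let i := PySem.List.bisectLeft ctrl (pos - islack)
  decide (i = ctrl.length) || decide (pos + islack ≤ ctrl.getD i 0)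

-- one outer step of B's loop 'for chrm in m_case'
def pvStepB (ctl : PySem.Dict String (List (Int × Int))) (islack : Int)
    (out : PySem.Dict String (PySem.Dict Int Int)) (cd : String × List (Int × Int)) :
    PySem.Dict String (PySem.Dict Int Int) :=
  match ctl.get? cd.1 with
  | none => out.insert cd.1 (PySem.Dict.mk cd.2)
  | some ps =>
      let ctrl := PySem.List.sorted (ps.map Prod.fst) (fun x => x)
      let kept := cd.2.foldl
        (fun kept pv => if pvKeepB ctrl islack pv.1 then kept.insert pv.1 pv.2 else kept)
        PySem.Dict.empty
      if kept.items.isEmpty then out else out.insert cd.1 kept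

def cmp_case_control_alt (m_case : List (String × List (Int × Int))) (m_control : List (String × List (Int × Int))) (islack : Int) : List (String × List (Int × Int)) :=
  ((m_case.foldl (pvStepB (PySem.Dict.mk m_control) islack) PySem.Dict.empty).items).map
    (fun p => (p.1, p.2.items))

-- ===== PRECONDITION & SPEC =====
-- Pre_ excludes association lists with duplicate keys (chrm keys of either dict, or
-- position keys inside a case value): those do not denote a Python dict at all, so A's
-- behaviour on them is an artefact of the list encoding. Every real dict input is admitted.
def Pre_cmp_case_control (m_case : List (String × List (Int × Int))) (m_control : List (String × List (Int × Int))) (islack : Int) : Prop :=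
  (m_case.map Prod.fst).Nodup ∧ (m_control.map Prod.fst).Nodup ∧
    ∀ p ∈ m_case, (p.2.map Prod.fst).Nodup
instance (m_case : List (String × List (Int × Int))) (m_control : List (String × List (Int × Int))) (islack : Int) : Decidable (Pre_cmp_case_control m_case m_control islack) := by unfold Pre_cmp_case_control; infer_instance

def pvWitness_cmp_case_control : (List (String × List (Int × Int))) × (List (String × List (Int × Int))) × Int :=
  ([("chr1", [(5, 2), (100, 1)]), ("chr2", [(7, 4)])], [("chr1", [(6, 3)])], 10)

def Spec_cmp_case_control (m_case : List (String × List (Int × Int))) (m_control : List (String × List (Int × Int))) (islack : Int) (out : List (String × List (Int × Int))) : Prop := out = cmp_case_control_alt m_case m_control islack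
instance (m_case : List (String × List (Int × Int))) (m_control : List (String × List (Int × Int))) (islack : Int) (out : List (String × List (Int × Int))) : Decidable (Spec_cmp_case_control m_case m_control islack out) := by unfold Spec_cmp_case_control; infer_instance

-- ===== CLAIM (what is proved, stated in full; the proofs are below) =====
def Claim_equal_cmp_case_control : Prop := ∀ (m_case : List (String × List (Int × Int))) (m_control : List (String × List (Int × Int))) (islack : Int), Dom_cmp_case_control m_case m_control islack → Pre_cmp_case_control m_case m_control islack → Spec_cmp_case_control m_case m_control islack (cmp_case_control m_case m_control islack)

-- ===== LEMMAS AND PROOFS =====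

lemma pv_modify_insert (c : PySem.Dict String (PySem.Dict Int Int)) (k : String)
    (inner : PySem.Dict Int Int) (f : PySem.Dict Int Int → PySem.Dict Int Int) :
    (c.insert k inner).modify k PySem.Dict.empty f = c.insert k (f inner) := by
  simp [PySem.Dict.modify, PySem.Dict.getD_insert_self, PySem.Dict.insert_insert_self]

lemma pv_foldA_none_created (l : List (Int × Int)) (c : PySem.Dict String (PySem.Dict Int Int))
    (k : String) (inner : PySem.Dict Int Int) :
    l.foldl (fun c pv => c.modify k PySem.Dict.empty (fun i => i.insert pv.1 pv.2)) (c.insert k inner)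
      = c.insert k (l.foldl (fun i pv => i.insert pv.1 pv.2) inner) := by
  induction l generalizing inner with
  | nil => rfl
  | cons pv t ih => simp only [List.foldl_cons, pv_modify_insert]; exact ih _

lemma pv_foldA_some_created (b : Int → Bool) (l : List (Int × Int))
    (c : PySem.Dict String (PySem.Dict Int Int)) (k : String) (inner : PySem.Dict Int Int) :
    l.foldl (fun acc pv => if b pv.1 then acc else
        (if acc.contains k then acc else acc.insert k PySem.Dict.empty).modify k PySem.Dict.empty
          (fun i => i.insert pv.1 pv.2)) (c.insert k inner)
      = c.insert k (l.foldl (fun i pv => if b pv.1 then i else i.insert pv.1 pv.2) inner) := by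
  induction l generalizing inner with
  | nil => rfl
  | cons pv t ih =>
    by_cases hb : b pv.1
    · simp only [List.foldl_cons, hb, if_true]; exact ih _
    · simp only [List.foldl_cons, hb, PySem.Dict.contains_insert_self, if_true,
        pv_modify_insert]
      exact ih _

lemma pv_foldA_some_fresh (b : Int → Bool) (l : List (Int × Int))
    (c : PySem.Dict String (PySem.Dict Int Int)) (k : String) (h : c.contains k = false) :
    l.foldl (fun acc pv => if b pv.1 then acc else
        (if acc.contains k then acc else acc.insert k PySem.Dict.empty).modify k PySem.Dict.empty
          (fun i => i.insert pv.1 pv.2)) c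
      = if (l.filter (fun pv => !b pv.1)) = [] then c
        else c.insert k ((l.filter (fun pv => !b pv.1)).foldl (fun i pv => i.insert pv.1 pv.2)
          PySem.Dict.empty) := by
  induction l with
  | nil => simp
  | cons pv t ih =>
    by_cases hb : b pv.1
    · simpa only [List.foldl_cons, hb, if_true, List.filter_cons, Bool.not_true] using ih
    · rw [List.foldl_cons]
      have hstep : (if b pv.1 then c else
          (if c.contains k then c else c.insert k PySem.Dict.empty).modify k PySem.Dict.empty
            (fun i => i.insert pv.1 pv.2))
          = c.insert k (PySem.Dict.empty.insert pv.1 pv.2) := by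
        rw [if_neg hb, h]; simp [pv_modify_insert]
      rw [hstep, pv_foldA_some_created]
      simp only [List.filter_cons, hb, Bool.not_false, if_true]
      simp only [List.foldl_cons, reduceCtorEq, if_false]
      congr 1
      rw [List.foldl_filter]
      have hfe : (fun (x : PySem.Dict Int Int) (y : Int × Int) =>
            if (!b y.1) = true then x.insert y.1 y.2 else x)
          = (fun i pv => if b pv.1 then i else i.insert pv.1 pv.2) := by
        funext i pv; cases hbx : b pv.1 <;> simp
      rw [← hfe]

lemma pv_foldB_filter (p : Int → Bool) (l : List (Int × Int)) :
    l.foldl (fun kept pv => if p pv.1 then kept.insert pv.1 pv.2 else kept)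
        (PySem.Dict.empty : PySem.Dict Int Int)
      = (l.filter (fun pv => p pv.1)).foldl (fun i pv => i.insert pv.1 pv.2) PySem.Dict.empty := by
  rw [List.foldl_filter]

lemma pv_items_insAll (l : List (Int × Int)) (hnd : (l.map Prod.fst).Nodup) :
    (l.foldl (fun i pv => i.insert pv.1 pv.2) (PySem.Dict.empty : PySem.Dict Int Int)).items = l := by
  have := PySem.Dict.items_foldl_insert_fresh l Prod.fst Prod.snd PySem.Dict.empty
    (fun a _ => PySem.Dict.contains_empty _) hnd
  simpa using this

lemma pv_pred (ps : List (Int × Int)) (islack pos : Int) :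
    pvKeepB (PySem.List.sorted (ps.map Prod.fst) (fun x => x)) islack pos
      = !((PySem.List.pyRange (-1 * islack) islack).any
          (fun i => (PySem.Dict.mk ps).contains (pos + i))) := by
  set s := PySem.List.sorted (ps.map Prod.fst) (fun x => x) with hs
  obtain ⟨h1, h2, h3⟩ := PySem.List.bisectLeft_spec s (pos - islack)
    (PySem.List.sorted_pairwise (ps.map Prod.fst) (fun x => x))
  set n := PySem.List.bisectLeft s (pos - islack) with hn
  have hmem : ((PySem.List.pyRange (-1 * islack) islack).any
      (fun i => (PySem.Dict.mk ps).contains (pos + i)) = true)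
      ↔ ∃ q ∈ s, pos - islack ≤ q ∧ q < pos + islack := by
    rw [List.any_eq_true]
    constructor
    · rintro ⟨i, hi, hc⟩
      rw [PySem.List.mem_pyRange_one] at hi
      refine ⟨pos + i, ?_, by omega, by omega⟩
      rw [hs, PySem.List.mem_sorted]
      have := (PySem.Dict.contains_iff_mem_keys _ _).mp hc
      simpa [PySem.Dict.keys_mk] using this
    · rintro ⟨q, hq, hlo, hhi⟩
      refine ⟨q - pos, by rw [PySem.List.mem_pyRange_one]; omega, ?_⟩
      have hq' : q ∈ ps.map Prod.fst := by rw [hs, PySem.List.mem_sorted] at hq; exact hq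
      have : pos + (q - pos) = q := by omega
      rw [this, PySem.Dict.contains_iff_mem_keys, PySem.Dict.keys_mk]
      simpa using hq'
  have hkeep : (pvKeepB s islack pos = true)
      ↔ ¬ ∃ q ∈ s, pos - islack ≤ q ∧ q < pos + islack := by
    simp only [pvKeepB, ← hn, Bool.or_eq_true, decide_eq_true_eq]
    constructor
    · rintro hk ⟨q, hq, hlo, hhi⟩
      obtain ⟨j, hj, rfl⟩ := List.mem_iff_getElem.mp hq
      have hjn : n ≤ j := by
        by_contra hlt
        exact absurd (h2 j hj (by omega)) (by omega)
      rcases hk with hk | hk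
      · omega
      · have hnlen : n < s.length := by omega
        rw [List.getD_eq_getElem s 0 hnlen] at hk
        have hmono : s[n]'hnlen ≤ s[j]'hj :=
          PySem.List.sorted_id_getElem_mono (ps.map Prod.fst) hjn hj
        omega
    · intro hno
      by_cases hlen : n = s.length
      · exact Or.inl hlen
      · right
        have hnlen : n < s.length := by omega
        have hge := h3 n hnlen le_rfl
        rw [List.getD_eq_getElem s 0 hnlen]
        by_contra hlt
        exact hno ⟨s[n], List.getElem_mem hnlen, hge, by omega⟩
  cases hy : (PySem.List.pyRange (-1 * islack) islack).any
      (fun i => (PySem.Dict.mk ps).contains (pos + i)) with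
  | false =>
    rw [Bool.not_false]
    apply hkeep.mpr
    intro hex
    have hcontra := hmem.mpr hex
    rw [hy] at hcontra
    exact absurd hcontra (by simp)
  | true =>
    rw [Bool.not_true]
    cases hpk : pvKeepB s islack pos with
    | false => rfl
    | true => exact absurd (hmem.mp hy) (hkeep.mp hpk)

lemma pv_step_eq (ctl : PySem.Dict String (List (Int × Int))) (islack : Int)
    (acc : PySem.Dict String (PySem.Dict Int Int)) (cd : String × List (Int × Int))
    (hfresh : acc.contains cd.1 = false) (hnd : (cd.2.map Prod.fst).Nodup) :
    pvStepA ctl islack acc cd = pvStepB ctl islack acc cd := by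
  cases hget : ctl.get? cd.1 with
  | none =>
    simp only [pvStepA, pvStepB, hget, hfresh, Bool.false_eq_true, if_false]
    rw [pv_foldA_none_created]
    congr 1
    apply PySem.Dict.ext
    rw [pv_items_insAll cd.2 hnd]
  | some ps =>
    simp only [pvStepA, pvStepB, hget]
    rw [pv_foldA_some_fresh (fun pos => (PySem.List.pyRange (-1 * islack) islack).any
      (fun i => (PySem.Dict.mk ps).contains (pos + i))) cd.2 acc cd.1 hfresh]
    have hpred : ∀ pv : Int × Int,
        (pvKeepB (PySem.List.sorted (ps.map Prod.fst) (fun x => x)) islack pv.1)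
          = !((PySem.List.pyRange (-1 * islack) islack).any
              (fun i => (PySem.Dict.mk ps).contains (pv.1 + i))) := fun pv => pv_pred ps islack pv.1
    rw [pv_foldB_filter]
    have hfe : cd.2.filter (fun pv => pvKeepB (PySem.List.sorted (ps.map Prod.fst) (fun x => x)) islack pv.1)
        = cd.2.filter (fun pv => !((PySem.List.pyRange (-1 * islack) islack).any
            (fun i => (PySem.Dict.mk ps).contains (pv.1 + i)))) := by
      apply List.filter_congr; intro x _; exact hpred x
    rw [hfe]
    set kl := cd.2.filter (fun pv => !((PySem.List.pyRange (-1 * islack) islack).any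
      (fun i => (PySem.Dict.mk ps).contains (pv.1 + i)))) with hkl
    have hklnd : (kl.map Prod.fst).Nodup := by
      apply List.Nodup.sublist _ hnd
      exact List.Sublist.map Prod.fst List.filter_sublist
    rw [pv_items_insAll kl hklnd]
    by_cases hk : kl = []
    · simp [hk]
    · simp [hk, List.isEmpty_iff]

lemma pv_stepB_fresh (ctl : PySem.Dict String (List (Int × Int))) (islack : Int)
    (acc : PySem.Dict String (PySem.Dict Int Int)) (cd : String × List (Int × Int))
    (x : String) (hx : x ≠ cd.1) (hacc : acc.contains x = false) :
    (pvStepB ctl islack acc cd).contains x = false := by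
  cases hget : ctl.get? cd.1 with
  | none => simp [pvStepB, hget, PySem.Dict.contains_insert, hacc, hx]
  | some ps =>
    simp only [pvStepB, hget]
    split
    · exact hacc
    · simp [PySem.Dict.contains_insert, hacc, hx]

lemma pv_fold_eq (ctl : PySem.Dict String (List (Int × Int))) (islack : Int)
    (mc : List (String × List (Int × Int))) (acc : PySem.Dict String (PySem.Dict Int Int))
    (hnd : (mc.map Prod.fst).Nodup) (hinner : ∀ p ∈ mc, (p.2.map Prod.fst).Nodup)
    (hfresh : ∀ p ∈ mc, acc.contains p.1 = false) :
    mc.foldl (pvStepA ctl islack) acc = mc.foldl (pvStepB ctl islack) acc := by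
  induction mc generalizing acc with
  | nil => rfl
  | cons cd t ih =>
    simp only [List.map_cons, List.nodup_cons] at hnd
    have hstep := pv_step_eq ctl islack acc cd (hfresh cd (by simp))
      (hinner cd (by simp))
    simp only [List.foldl_cons, hstep]
    refine ih _ hnd.2 (fun p hp => hinner p (by simp [hp])) ?_
    intro p hp
    have hpne : p.1 ≠ cd.1 := by
      intro he
      exact hnd.1 (he ▸ List.mem_map_of_mem hp)
    exact pv_stepB_fresh ctl islack acc cd p.1 hpne (hfresh p (by simp [hp]))

-- ===== VERDICT (by name: the statement is the Claim_ definition above) =====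
theorem cmp_case_control_spec : Claim_equal_cmp_case_control := by
  intro m_case m_control islack _ hpre
  obtain ⟨hnd, _, hinner⟩ := hpre
  unfold Spec_cmp_case_control cmp_case_control cmp_case_control_alt
  rw [pv_fold_eq _ _ _ _ hnd hinner (fun p _ => PySem.Dict.contains_empty _)]
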